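-- pv_equiv track=rewrite | github.com/LeGeRyChEeSe/sunshine-aio-library | scripts/validate.py | _detect_platforms_from_releases
-- ===== SOURCE A (Python) =====
-- from typing import Dict, List, Any, Tuple, Optional
--
-- def _detect_platforms_from_releases(assets: List[Dict], repo_language: str) -> List[str]:
--     """Detect supported platforms from release assets."""
--     platforms = set()
--
--     if not assets:
--         # Fallback based on language
--         if repo_language in ["Python", "JavaScript", "TypeScript", "Java"]:
--             return ["Cross-platform"]
--         else:
--             return ["Windows", "Linux", "macOS"]
--
--     for asset in assets:
--         name = asset.get("name", "").lower()
--         if any(term in name for term in ["win", "windows", ".exe", ".msi"]):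
--             platforms.add("Windows")
--         if any(term in name for term in ["linux", ".deb", ".rpm", ".tar.gz"]):
--             platforms.add("Linux")
--         if any(term in name for term in ["mac", "macos", "darwin"]):
--             platforms.add("macOS")
--
--     if not platforms:
--         platforms.add("Cross-platform")
--
--     return sorted(list(platforms))
-- ===== SOURCE B (Python) =====
-- def _detect_platforms_from_releases(assets, repo_language):
--     """Detect supported platforms from release assets (platform-driven scan)."""
--     if not assets:
--         if repo_language in ["Python", "JavaScript", "TypeScript", "Java"]:
--             return ["Cross-platform"]
--         return ["Windows", "Linux", "macOS"]
--
--     names = [asset.get("name", "").lower() for asset in assets]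
--     # table in sorted output order, so no final sort is needed
--     table = [
--         ("Linux", ["linux", ".deb", ".rpm", ".tar.gz"]),
--         ("Windows", ["win", "windows", ".exe", ".msi"]),
--         ("macOS", ["mac", "macos", "darwin"]),
--     ]
--     detected = [platform for platform, terms in table
--                 if any(term in name for name in names for term in terms)]
--     return detected if detected else ["Cross-platform"]
-- ===== Notes on version B (the rewrite author's own statement) =====
-- stated objective: alternative
-- what changed: Inverts the loop nesting: instead of scanning assets and accumulating a set that is sorted at the end, B precomputes the lowercased names once and then decides each platform independently by scanning that list against a platform->terms table listed in sorted order, so no set and no final sort are needed.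
import Mathlib
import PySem

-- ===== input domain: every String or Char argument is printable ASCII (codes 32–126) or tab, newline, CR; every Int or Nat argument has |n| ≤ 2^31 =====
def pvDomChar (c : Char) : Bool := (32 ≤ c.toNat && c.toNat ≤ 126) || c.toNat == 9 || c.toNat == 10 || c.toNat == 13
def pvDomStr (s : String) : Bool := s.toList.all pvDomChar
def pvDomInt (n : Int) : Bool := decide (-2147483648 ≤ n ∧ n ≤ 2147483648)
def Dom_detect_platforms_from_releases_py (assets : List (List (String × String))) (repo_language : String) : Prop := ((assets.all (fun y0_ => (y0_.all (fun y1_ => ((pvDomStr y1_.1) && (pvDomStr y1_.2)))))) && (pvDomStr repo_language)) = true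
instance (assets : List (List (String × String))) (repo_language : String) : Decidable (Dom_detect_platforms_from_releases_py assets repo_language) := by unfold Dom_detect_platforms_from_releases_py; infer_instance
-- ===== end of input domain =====

-- B replaces A's asset-outer accumulate-into-a-set-then-sort loop with a platform-outer scan of a
-- precomputed lowercased-names list against a platform→terms table listed in sorted order (no set, no sort).

-- ===== PORT A =====
def detect_platforms_from_releases_py (assets : List (List (String × String))) (repo_language : String) : List String :=
  if assets = [] then
    if repo_language ∈ ["Python", "JavaScript", "TypeScript", "Java"] then ["Cross-platform"]
    else ["Windows", "Linux", "macOS"]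
  else
    let platforms : PySem.Set String := assets.foldl (fun pl asset =>
      let name := PySem.Str.lower (PySem.Dict.getD (PySem.Dict.mk asset) "name" "")
      let pl := if ["win", "windows", ".exe", ".msi"].any (fun term => PySem.Str.isIn term name) then PySem.Set.add pl "Windows" else pl
      let pl := if ["linux", ".deb", ".rpm", ".tar.gz"].any (fun term => PySem.Str.isIn term name) then PySem.Set.add pl "Linux" else pl
      if ["mac", "macos", "darwin"].any (fun term => PySem.Str.isIn term name) then PySem.Set.add pl "macOS" else pl)
      PySem.Set.empty
    let platforms := if platforms = [] then PySem.Set.add platforms "Cross-platform" else platforms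
    PySem.List.sorted platforms (fun x => x) false

-- ===== PORT B =====
def detect_platforms_from_releases_py_alt (assets : List (List (String × String))) (repo_language : String) : List String :=
  if assets = [] then
    if repo_language ∈ ["Python", "JavaScript", "TypeScript", "Java"] then ["Cross-platform"]
    else ["Windows", "Linux", "macOS"]
  else
    let names := assets.map (fun asset => PySem.Str.lower (PySem.Dict.getD (PySem.Dict.mk asset) "name" ""))
    let table : List (String × List String) :=
      [("Linux", ["linux", ".deb", ".rpm", ".tar.gz"]),
       ("Windows", ["win", "windows", ".exe", ".msi"]),
       ("macOS", ["mac", "macos", "darwin"])]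
    let detected := (table.filter (fun pt => names.any (fun name => pt.2.any (fun term => PySem.Str.isIn term name)))).map (fun pt => pt.1)
    if detected = [] then ["Cross-platform"] else detected

-- ===== PRECONDITION & SPEC =====
def Spec_detect_platforms_from_releases_py (assets : List (List (String × String))) (repo_language : String) (out : List String) : Prop := out = detect_platforms_from_releases_py_alt assets repo_language
instance (assets : List (List (String × String))) (repo_language : String) (out : List String) : Decidable (Spec_detect_platforms_from_releases_py assets repo_language out) := by unfold Spec_detect_platforms_from_releases_py; infer_instance

-- ===== CLAIM (what is proved, stated in full; the proofs are below) =====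
def Claim_equal_detect_platforms_from_releases_py : Prop := ∀ (assets : List (List (String × String))) (repo_language : String), Dom_detect_platforms_from_releases_py assets repo_language → Spec_detect_platforms_from_releases_py assets repo_language (detect_platforms_from_releases_py assets repo_language)

-- ===== LEMMAS AND PROOFS =====

-- the lowercased asset name both programs inspect
def pvName (asset : List (String × String)) : String :=
  PySem.Str.lower (PySem.Dict.getD (PySem.Dict.mk asset) "name" "")

-- per-asset platform matches (A's three `any` tests)
def pvW (asset : List (String × String)) : Bool :=
  ["win", "windows", ".exe", ".msi"].any (fun term => PySem.Str.isIn term (pvName asset))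
def pvL (asset : List (String × String)) : Bool :=
  ["linux", ".deb", ".rpm", ".tar.gz"].any (fun term => PySem.Str.isIn term (pvName asset))
def pvM (asset : List (String × String)) : Bool :=
  ["mac", "macos", "darwin"].any (fun term => PySem.Str.isIn term (pvName asset))

-- A's loop body as a named step function
def pvStep (pl : PySem.Set String) (asset : List (String × String)) : PySem.Set String :=
  let pl := if pvW asset then PySem.Set.add pl "Windows" else pl
  let pl := if pvL asset then PySem.Set.add pl "Linux" else pl
  if pvM asset then PySem.Set.add pl "macOS" else pl

lemma pvStep_mem (pl : PySem.Set String) (a : List (String × String)) (p : String) :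
    p ∈ pvStep pl a ↔ p ∈ pl ∨ (p = "Windows" ∧ pvW a) ∨ (p = "Linux" ∧ pvL a) ∨ (p = "macOS" ∧ pvM a) := by
  unfold pvStep
  cases hw : pvW a <;> cases hl : pvL a <;> cases hm : pvM a <;>
    simp [PySem.Set.mem_add, or_assoc]

-- propositional shuffle used by pvFold_mem (abstract atoms keep `tauto` fast)
lemma pvOrShuffle (A W L M w1 w2 l1 l2 m1 m2 : Prop) :
    ((A ∨ (W ∧ w1) ∨ (L ∧ l1) ∨ (M ∧ m1)) ∨ (W ∧ w2) ∨ (L ∧ l2) ∨ (M ∧ m2)) ↔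
      (A ∨ (W ∧ (w1 ∨ w2)) ∨ (L ∧ (l1 ∨ l2)) ∨ (M ∧ (m1 ∨ m2))) := by
  tauto

lemma pvFold_mem (assets : List (List (String × String))) (pl : List String) (p : String) :
    p ∈ assets.foldl pvStep pl ↔
      p ∈ pl ∨ (p = "Windows" ∧ assets.any pvW) ∨ (p = "Linux" ∧ assets.any pvL) ∨ (p = "macOS" ∧ assets.any pvM) := by
  induction assets generalizing pl with
  | nil => simp
  | cons a t ih =>
    simp only [List.foldl_cons, ih, pvStep_mem, List.any_cons, Bool.or_eq_true]
    exact pvOrShuffle _ _ _ _ _ _ _ _ _ _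

lemma pvStep_nodup (pl : PySem.Set String) (a : List (String × String)) (h : pl.Nodup) :
    (pvStep pl a).Nodup := by
  unfold pvStep
  split_ifs <;> (repeat first | assumption | apply PySem.Set.nodup_add)

lemma pvFold_nodup (assets : List (List (String × String))) (pl : List String) (h : pl.Nodup) :
    (assets.foldl pvStep pl).Nodup := by
  induction assets generalizing pl with
  | nil => exact h
  | cons a t ih => exact ih _ (pvStep_nodup _ _ h)

-- sorted(fold) equals any strictly increasing list with the fold's membership
lemma pvA_core (assets : List (List (String × String))) (ys : List String)
    (hysnd : ys.Nodup) (hpw : ys.Pairwise (fun a b => a < b))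
    (hmem : ∀ p, p ∈ ys ↔ (p = "Windows" ∧ assets.any pvW) ∨ (p = "Linux" ∧ assets.any pvL) ∨ (p = "macOS" ∧ assets.any pvM)) :
    PySem.List.sorted (assets.foldl pvStep PySem.Set.empty) (fun x => x) false = ys := by
  apply PySem.List.sorted_eq_of_perm_of_pairwise_lt _ _ _ _ hpw
  refine (List.perm_ext_iff_of_nodup hysnd (pvFold_nodup _ _ (by simp [PySem.Set.empty]))).mpr ?_
  intro p
  rw [hmem, pvFold_mem]
  simp [PySem.Set.empty]

-- ===== VERDICT (by name: the statement is the Claim_ definition above) =====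
set_option maxHeartbeats 1000000 in
theorem detect_platforms_from_releases_py_spec : Claim_equal_detect_platforms_from_releases_py := by
  intro assets repo_language _
  unfold Spec_detect_platforms_from_releases_py detect_platforms_from_releases_py detect_platforms_from_releases_py_alt
  by_cases h : assets = []
  · simp [h]
  · simp only [if_neg h]
    have hstep : (fun (pl : PySem.Set String) (asset : List (String × String)) =>
        let name := PySem.Str.lower (PySem.Dict.getD (PySem.Dict.mk asset) "name" "")
        let pl := if ["win", "windows", ".exe", ".msi"].any (fun term => PySem.Str.isIn term name) then PySem.Set.add pl "Windows" else pl
        let pl := if ["linux", ".deb", ".rpm", ".tar.gz"].any (fun term => PySem.Str.isIn term name) then PySem.Set.add pl "Linux" else pl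
        if ["mac", "macos", "darwin"].any (fun term => PySem.Str.isIn term name) then PySem.Set.add pl "macOS" else pl) = pvStep := rfl
    rw [hstep]
    have hanyW : (assets.map (fun asset => PySem.Str.lower (PySem.Dict.getD (PySem.Dict.mk asset) "name" ""))).any
        (fun name => (["win", "windows", ".exe", ".msi"] : List String).any (fun term => PySem.Str.isIn term name)) = assets.any pvW := by
      rw [List.any_map]; rfl
    have hanyL : (assets.map (fun asset => PySem.Str.lower (PySem.Dict.getD (PySem.Dict.mk asset) "name" ""))).any
        (fun name => (["linux", ".deb", ".rpm", ".tar.gz"] : List String).any (fun term => PySem.Str.isIn term name)) = assets.any pvL := by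
      rw [List.any_map]; rfl
    have hanyM : (assets.map (fun asset => PySem.Str.lower (PySem.Dict.getD (PySem.Dict.mk asset) "name" ""))).any
        (fun name => (["mac", "macos", "darwin"] : List String).any (fun term => PySem.Str.isIn term name)) = assets.any pvM := by
      rw [List.any_map]; rfl
    cases hW : assets.any pvW <;> cases hL : assets.any pvL <;> cases hM : assets.any pvM <;>
      simp only [List.filter_cons, List.filter_nil, hanyW, hanyL, hanyM, hW, hL, hM,
        Bool.false_eq_true, eq_self_iff_true, if_true, if_false, List.map_cons, List.map_nil,
        reduceCtorEq, reduceIte]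
    -- (false,false,false): nothing matched, both fall back to Cross-platform
    · have hempty : assets.foldl pvStep PySem.Set.empty = [] := by
        have hperm : (assets.foldl pvStep PySem.Set.empty).Perm ([] : List String) :=
          (List.perm_ext_iff_of_nodup (pvFold_nodup _ _ (by simp [PySem.Set.empty])) List.nodup_nil).mpr
            (by intro p; rw [pvFold_mem]; simp [PySem.Set.empty, hW, hL, hM])
        simpa using hperm.eq_nil
      rw [if_pos hempty, hempty]
      decide
    -- (false,false,true): macOS only
    · have hne : assets.foldl pvStep PySem.Set.empty ≠ [] :=
        List.ne_nil_of_mem ((pvFold_mem assets _ "macOS").mpr (Or.inr (Or.inr (Or.inr ⟨rfl, hM⟩))))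
      rw [if_neg hne]
      exact pvA_core assets ["macOS"] (by decide) (by simp [List.pairwise_cons, String.lt_iff_toList_lt] <;> decide)
        (by intro p; simp [hW, hL, hM])
    -- (false,true,false): Linux only
    · have hne : assets.foldl pvStep PySem.Set.empty ≠ [] :=
        List.ne_nil_of_mem ((pvFold_mem assets _ "Linux").mpr (Or.inr (Or.inr (Or.inl ⟨rfl, hL⟩))))
      rw [if_neg hne]
      exact pvA_core assets ["Linux"] (by decide) (by simp [List.pairwise_cons, String.lt_iff_toList_lt] <;> decide)
        (by intro p; simp [hW, hL, hM])
    -- (false,true,true): Linux, macOS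
    · have hne : assets.foldl pvStep PySem.Set.empty ≠ [] :=
        List.ne_nil_of_mem ((pvFold_mem assets _ "Linux").mpr (Or.inr (Or.inr (Or.inl ⟨rfl, hL⟩))))
      rw [if_neg hne]
      exact pvA_core assets ["Linux", "macOS"] (by decide) (by simp [List.pairwise_cons, String.lt_iff_toList_lt] <;> decide)
        (by intro p; simp [hW, hL, hM])
    -- (true,false,false): Windows only
    · have hne : assets.foldl pvStep PySem.Set.empty ≠ [] :=
        List.ne_nil_of_mem ((pvFold_mem assets _ "Windows").mpr (Or.inr (Or.inl ⟨rfl, hW⟩)))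
      rw [if_neg hne]
      exact pvA_core assets ["Windows"] (by decide) (by simp [List.pairwise_cons, String.lt_iff_toList_lt] <;> decide)
        (by intro p; simp [hW, hL, hM])
    -- (true,false,true): Windows, macOS
    · have hne : assets.foldl pvStep PySem.Set.empty ≠ [] :=
        List.ne_nil_of_mem ((pvFold_mem assets _ "Windows").mpr (Or.inr (Or.inl ⟨rfl, hW⟩)))
      rw [if_neg hne]
      exact pvA_core assets ["Windows", "macOS"] (by decide) (by simp [List.pairwise_cons, String.lt_iff_toList_lt] <;> decide)
        (by intro p; simp [hW, hL, hM])
    -- (true,true,false): Linux, Windows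
    · have hne : assets.foldl pvStep PySem.Set.empty ≠ [] :=
        List.ne_nil_of_mem ((pvFold_mem assets _ "Windows").mpr (Or.inr (Or.inl ⟨rfl, hW⟩)))
      rw [if_neg hne]
      exact pvA_core assets ["Linux", "Windows"] (by decide) (by simp [List.pairwise_cons, String.lt_iff_toList_lt] <;> decide)
        (by intro p; simp [hW, hL, hM, or_comm])
    -- (true,true,true): all three
    · have hne : assets.foldl pvStep PySem.Set.empty ≠ [] :=
        List.ne_nil_of_mem ((pvFold_mem assets _ "Windows").mpr (Or.inr (Or.inl ⟨rfl, hW⟩)))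
      rw [if_neg hne]
      exact pvA_core assets ["Linux", "Windows", "macOS"] (by decide) (by simp [List.pairwise_cons, String.lt_iff_toList_lt] <;> decide)
        (by intro p; simp [hW, hL, hM, or_comm, or_assoc, or_left_comm])
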